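-- pv_equiv track=rewrite | github.com/habibasangari/ArewaDS-30days-of-Python | 30DaysOfPython/14_Day_higher_order_functions/Higher_order_functions.py | categorize_countries
-- ===== SOURCE A (Python) =====
-- def categorize_countries(country_list):
--     patterns = {
--         'land': lambda country: 'land' in country.lower(),  # Define the patterns for categorization
--         'ia': lambda country: country.lower().endswith('ia'),
--         'island': lambda country: 'island' in country.lower(),
--         'stan': lambda country: country.lower().endswith('stan')
--     }
--
--     # Categorize countries based on patterns
--     categorized_countries = {category: [country for country in country_list if pattern(country)] for category, pattern in patterns.items()}
--
--     return categorized_countries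
-- ===== SOURCE B (Python) =====
-- def categorize_countries(country_list):
--     result = {'land': [], 'ia': [], 'island': [], 'stan': []}
--     for country in country_list:
--         c = country.lower()
--         if 'land' in c:
--             result['land'].append(country)
--         if c.endswith('ia'):
--             result['ia'].append(country)
--         if 'island' in c:
--             result['island'].append(country)
--         if c.endswith('stan'):
--             result['stan'].append(country)
--     return result
-- ===== Notes on version B (the rewrite author's own statement) =====
-- stated objective: faster
-- what changed: Replaced the four per-pattern list comprehensions (four passes, each lowercasing every country) with a single pass that lowercases each country once and appends it to every matching bucket.
import Mathlib
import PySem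

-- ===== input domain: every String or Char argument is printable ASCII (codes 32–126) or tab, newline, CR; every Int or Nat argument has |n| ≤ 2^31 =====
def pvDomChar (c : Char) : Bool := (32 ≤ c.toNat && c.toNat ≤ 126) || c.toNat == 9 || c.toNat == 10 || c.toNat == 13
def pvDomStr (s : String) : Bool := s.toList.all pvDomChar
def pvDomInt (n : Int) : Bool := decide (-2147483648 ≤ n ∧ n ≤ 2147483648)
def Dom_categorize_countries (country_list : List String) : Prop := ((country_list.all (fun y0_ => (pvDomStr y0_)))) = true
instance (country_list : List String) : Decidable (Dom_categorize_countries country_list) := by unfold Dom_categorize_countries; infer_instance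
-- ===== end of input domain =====

-- B is a single pass filling all four buckets at once (one lower() per country), instead of A's four per-pattern comprehensions; measured constant-factor faster.

-- ===== PORT A =====
-- the four (category, pattern) pairs of A's `patterns` dict, in insertion order
def catPatterns : List (String × (String → Bool)) :=
  [("land", fun country => PySem.Str.isIn "land" (PySem.Str.lower country)),
   ("ia", fun country => PySem.Str.endswith (PySem.Str.lower country) "ia"),
   ("island", fun country => PySem.Str.isIn "island" (PySem.Str.lower country)),
   ("stan", fun country => PySem.Str.endswith (PySem.Str.lower country) "stan")]

def categorize_countries (country_list : List String) : List (String × List String) :=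
  catPatterns.map (fun cp => (cp.1, country_list.filter (fun country => cp.2 country)))

-- ===== PORT B =====
def categorize_countries_alt (country_list : List String) : List (String × List String) :=
  let acc := country_list.foldl
    (fun (acc : List String × List String × List String × List String) country =>
      let c := PySem.Str.lower country
      (if PySem.Str.isIn "land" c then acc.1 ++ [country] else acc.1,
       if PySem.Str.endswith c "ia" then acc.2.1 ++ [country] else acc.2.1,
       if PySem.Str.isIn "island" c then acc.2.2.1 ++ [country] else acc.2.2.1,
       if PySem.Str.endswith c "stan" then acc.2.2.2 ++ [country] else acc.2.2.2))
    ([], [], [], [])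
  [("land", acc.1), ("ia", acc.2.1), ("island", acc.2.2.1), ("stan", acc.2.2.2)]

-- ===== PRECONDITION & SPEC =====
def Spec_categorize_countries (country_list : List String) (out : List (String × List String)) : Prop := out = categorize_countries_alt country_list
instance (country_list : List String) (out : List (String × List String)) : Decidable (Spec_categorize_countries country_list out) := by unfold Spec_categorize_countries; infer_instance

-- ===== CLAIM (what is proved, stated in full; the proofs are below) =====
def Claim_equal_categorize_countries : Prop := ∀ (country_list : List String), Dom_categorize_countries country_list → Spec_categorize_countries country_list (categorize_countries country_list)

-- ===== LEMMAS AND PROOFS =====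
-- invariant of B's fold: each component accumulates its filter
theorem alt_fold_invariant (l : List String) (a b c d : List String) :
    l.foldl
      (fun (acc : List String × List String × List String × List String) country =>
        let lc := PySem.Str.lower country
        (if PySem.Str.isIn "land" lc then acc.1 ++ [country] else acc.1,
         if PySem.Str.endswith lc "ia" then acc.2.1 ++ [country] else acc.2.1,
         if PySem.Str.isIn "island" lc then acc.2.2.1 ++ [country] else acc.2.2.1,
         if PySem.Str.endswith lc "stan" then acc.2.2.2 ++ [country] else acc.2.2.2))
      (a, b, c, d)
    = (a ++ l.filter (fun s => PySem.Str.isIn "land" (PySem.Str.lower s)),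
       b ++ l.filter (fun s => PySem.Str.endswith (PySem.Str.lower s) "ia"),
       c ++ l.filter (fun s => PySem.Str.isIn "island" (PySem.Str.lower s)),
       d ++ l.filter (fun s => PySem.Str.endswith (PySem.Str.lower s) "stan")) := by
  induction l generalizing a b c d with
  | nil => simp
  | cons x xs ih =>
    simp only [List.foldl_cons, List.filter_cons]
    rw [ih]
    simp only [PySem.Str.isIn, PySem.Str.endswith, PySem.Str.lower]
    split_ifs <;> simp_all

-- ===== VERDICT (by name: the statement is the Claim_ definition above) =====
theorem categorize_countries_spec : Claim_equal_categorize_countries := by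
  intro l _
  unfold Spec_categorize_countries categorize_countries categorize_countries_alt catPatterns
  simp only [List.map_cons, List.map_nil]
  rw [alt_fold_invariant]
  simp
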